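-- pv_equiv track=rewrite | github.com/LaoZX/Python | RandNum/RandomNumGenerator.py | Rand2
-- ===== SOURCE A (Python) =====
-- def Rand2(n):
--     x=1
--     A=48271
--     M=21474836447
--     Q = M // A #floor division
--     R = M % A
--     rand_seq=[]
--     for i in range(n):
--         x = A * (x % Q) - R * (x // Q)
--         if x<0:
--             x+=M
--         rand_seq.append(x)
--     return rand_seq
-- ===== SOURCE B (Python) =====
-- def Rand2(n):
--     # Lehmer generator closed form: with seed 1, the i-th output is A**(i+1) mod M,
--     # computed directly by modular exponentiation instead of Schrage's decomposition.
--     return [pow(48271, i + 1, 21474836447) for i in range(n)]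
-- ===== Notes on version B (the rewrite author's own statement) =====
-- stated objective: alternative
-- what changed: Replaces Schrage's overflow-avoiding decomposition (quotient/remainder split, two-term subtraction, conditional correction) and the running-state loop by a closed form: since the seed is one, the i-th output is the multiplier raised to the (i+1)-th power modulo M, computed per element with three-argument pow in a comprehension.
import Mathlib
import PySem

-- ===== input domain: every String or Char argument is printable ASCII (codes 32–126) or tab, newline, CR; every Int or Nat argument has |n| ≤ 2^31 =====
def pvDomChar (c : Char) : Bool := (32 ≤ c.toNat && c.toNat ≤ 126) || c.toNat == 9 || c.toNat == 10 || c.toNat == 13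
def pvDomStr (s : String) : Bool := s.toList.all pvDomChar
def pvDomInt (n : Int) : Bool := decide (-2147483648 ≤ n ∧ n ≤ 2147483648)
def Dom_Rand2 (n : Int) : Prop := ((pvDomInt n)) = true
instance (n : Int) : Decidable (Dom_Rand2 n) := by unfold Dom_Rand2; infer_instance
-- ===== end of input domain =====

-- B replaces Schrage's decomposed Lehmer step by the closed form "multiplier to the (i+1)-th power mod M" (alternative, not faster).
-- ===== PORT A =====
-- the loop body of A, named so the proofs can speak about one step
def Rand2_loop (A M Q R : Int) (st : Int × List Int) (_ : Int) : Int × List Int :=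
  let x := A * (PySem.Int.mod st.1 Q) - R * (PySem.Int.floordiv st.1 Q)
  let x := if x < 0 then x + M else x
  (x, st.2 ++ [x])

def Rand2 (n : Int) : List Int :=
  let A : Int := 48271
  let M : Int := 21474836447
  let Q : Int := PySem.Int.floordiv M A
  let R : Int := PySem.Int.mod M A
  ((PySem.List.pyRange 0 n 1).foldl (Rand2_loop A M Q R) ((1 : Int), ([] : List Int))).2

-- ===== PORT B =====
def Rand2_alt (n : Int) : List Int :=
  (PySem.List.pyRange 0 n 1).map (fun i => 48271 ^ (i + 1).toNat % 21474836447)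

-- ===== PRECONDITION & SPEC =====
def Spec_Rand2 (n : Int) (out : List Int) : Prop := out = Rand2_alt n
instance (n : Int) (out : List Int) : Decidable (Spec_Rand2 n out) := by unfold Spec_Rand2; infer_instance

-- ===== CLAIM (what is proved, stated in full; the proofs are below) =====
def Claim_equal_Rand2 : Prop := ∀ (n : Int), Dom_Rand2 n → Spec_Rand2 n (Rand2 n)

-- ===== LEMMAS AND PROOFS =====

lemma schrage_step (x : Int) (acc : List Int) (j : Int) (h0 : 0 ≤ x) (h1 : x < 21474836447) :
    Rand2_loop 48271 21474836447 444880 33967 (x, acc) j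
      = (48271 * x % 21474836447, acc ++ [48271 * x % 21474836447]) := by
  unfold Rand2_loop
  rw [show PySem.Int.mod x 444880 = x % 444880 from PySem.Int.mod_eq_emod_of_pos (by norm_num),
      show PySem.Int.floordiv x 444880 = x / 444880 from PySem.Int.floordiv_eq_ediv_of_pos (by norm_num)]
  have : (if 48271 * (x % 444880) - 33967 * (x / 444880) < 0
      then 48271 * (x % 444880) - 33967 * (x / 444880) + 21474836447
      else 48271 * (x % 444880) - 33967 * (x / 444880)) = 48271 * x % 21474836447 := by
    split_ifs <;> omega
  simp only [this]

lemma fold_inv (m : Nat) :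
    (((List.range m).map (fun (k : Nat) => ((0 : Int) + (k : Int)))).foldl
      (Rand2_loop 48271 21474836447 444880 33967)
      ((1 : Int), ([] : List Int)))
    = (48271 ^ m % 21474836447,
       (List.range m).map (fun k => 48271 ^ (k + 1) % 21474836447)) := by
  induction m with
  | zero => simp
  | succ m ih =>
    have hb0 : (0 : Int) ≤ 48271 ^ m % 21474836447 := Int.emod_nonneg _ (by norm_num)
    have hb1 : (48271:Int) ^ m % 21474836447 < 21474836447 :=
      Int.emod_lt_of_pos (48271 ^ m) (b := 21474836447) (by norm_num)
    rw [List.range_succ, List.map_append, List.foldl_append, ih]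
    simp only [List.map_cons, List.map_nil, List.foldl_cons, List.foldl_nil]
    rw [schrage_step _ _ _ hb0 hb1]
    have hpow : (48271 : Int) * ((48271 : Int) ^ m % 21474836447) % 21474836447
        = (48271 : Int) ^ (m + 1) % 21474836447 := by
      conv_rhs => rw [pow_succ, mul_comm]
      conv_lhs => rw [Int.mul_emod, Int.emod_emod_of_dvd _ dvd_rfl]
      rw [Int.mul_emod 48271 ((48271:Int) ^ m) 21474836447]
    simp [hpow]

-- ===== VERDICT (by name: the statement is the Claim_ definition above) =====
theorem Rand2_spec : Claim_equal_Rand2 := by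
  intro n _
  unfold Spec_Rand2 Rand2 Rand2_alt
  have hQ : PySem.Int.floordiv 21474836447 48271 = 444880 := by decide
  have hR : PySem.Int.mod 21474836447 48271 = 33967 := by decide
  simp only [hQ, hR, PySem.List.pyRange_one, Int.sub_zero]
  rw [fold_inv (n.toNat)]
  rw [List.map_map]
  apply List.map_congr_left
  intro k _
  simp only [Function.comp]
  norm_num
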